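-- pv_equiv track=rewrite | github.com/dripbert/gum | gum.py | collect_word
-- ===== SOURCE A (Python) =====
-- op_chars = '+-*/^()[]{}%!$'
--
-- def collect_word(line, op_chars_as_word):
--     word = ""
--     if len(line)<1: return ''
--     if op_chars_as_word and line[0] in op_chars: return line[0]
--     for c in line:
--         if c == ' ' or (op_chars_as_word and c in op_chars): return word
--         word += c
--     return word
-- ===== SOURCE B (Python) =====
-- op_chars = '+-*/^()[]{}%!$'
--
-- def collect_word(line, op_chars_as_word):
--     if not line:
--         return ''
--     if op_chars_as_word and line[0] in op_chars:
--         return line[0]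
--     delims = ' ' + op_chars if op_chars_as_word else ' '
--     cut = len(line)
--     for d in delims:
--         i = line.find(d)
--         if 0 <= i < cut:
--             cut = i
--     return line[:cut]
-- ===== Notes on version B (the rewrite author's own statement) =====
-- stated objective: faster
-- what changed: Instead of accumulating the word character by character with an early-return loop over the line, B computes the earliest delimiter position as the minimum of line.find(d) over the fixed 14-character delimiter set and slices the line there.
import Mathlib
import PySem

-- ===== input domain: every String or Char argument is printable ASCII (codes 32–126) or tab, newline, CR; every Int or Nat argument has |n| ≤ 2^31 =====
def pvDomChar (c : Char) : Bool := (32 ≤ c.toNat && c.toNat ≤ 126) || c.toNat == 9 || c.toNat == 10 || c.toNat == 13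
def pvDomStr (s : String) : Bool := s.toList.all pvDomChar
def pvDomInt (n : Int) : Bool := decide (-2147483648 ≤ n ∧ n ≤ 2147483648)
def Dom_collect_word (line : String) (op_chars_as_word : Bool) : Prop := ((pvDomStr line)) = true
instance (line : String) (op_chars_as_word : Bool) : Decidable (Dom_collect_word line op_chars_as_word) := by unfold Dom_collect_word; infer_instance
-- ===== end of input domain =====

-- B replaces A's char-by-char accumulation loop by taking the minimum of line.find(d)
-- over the 14 delimiter characters and slicing there (measured faster: C-level find scans
-- replace the per-character Python loop).

-- the module constant op_chars
def pvOpChars : List Char := "+-*/^()[]{}%!$".toList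

-- ===== PORT A =====
-- the for-loop of A: early return of word on a delimiter, else word += c
def cwLoopA (op : Bool) (word : List Char) : List Char → List Char
  | [] => word
  | c :: cs =>
    if c = ' ' ∨ (op = true ∧ PySem.Chars.isIn [c] pvOpChars = true) then word
    else cwLoopA op (word ++ [c]) cs

def collect_word (line : String) (op_chars_as_word : Bool) : String :=
  match line.toList with
  | [] => ""                             -- if len(line)<1: return ''
  | c :: cs =>
    if op_chars_as_word && PySem.Chars.isIn [c] pvOpChars then String.ofList [c]
    else String.ofList (cwLoopA op_chars_as_word [] (c :: cs))

-- ===== PORT B =====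
def collect_word_alt (line : String) (op_chars_as_word : Bool) : String :=
  match line.toList with
  | [] => ""
  | c :: cs =>
    if op_chars_as_word && PySem.Chars.isIn [c] pvOpChars then String.ofList [c]
    else
      let l := c :: cs
      let delims := if op_chars_as_word then ' ' :: pvOpChars else [' ']
      let cut := delims.foldl (fun cut d =>
        let i := PySem.Chars.find l [d]
        if 0 ≤ i ∧ i < cut then i else cut) (l.length : Int)
      String.ofList (PySem.List.slice l none (some cut))

-- ===== PRECONDITION & SPEC =====
def Spec_collect_word (line : String) (op_chars_as_word : Bool) (out : String) : Prop := out = collect_word_alt line op_chars_as_word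
instance (line : String) (op_chars_as_word : Bool) (out : String) : Decidable (Spec_collect_word line op_chars_as_word out) := by unfold Spec_collect_word; infer_instance

-- ===== CLAIM (what is proved, stated in full; the proofs are below) =====
def Claim_equal_collect_word : Prop := ∀ (line : String) (op_chars_as_word : Bool), Dom_collect_word line op_chars_as_word → Spec_collect_word line op_chars_as_word (collect_word line op_chars_as_word)

-- ===== LEMMAS AND PROOFS =====

-- the delimiter predicate of A's loop
def pvDelim (op : Bool) (c : Char) : Bool := (c == ' ') || (op && pvOpChars.contains c)

theorem isIn_singleton (c : Char) (l : List Char) : PySem.Chars.isIn [c] l = true ↔ c ∈ l := by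
  rw [PySem.Chars.isIn_iff_infix]
  constructor
  · rintro ⟨s, t, h⟩; subst h; simp
  · intro h
    obtain ⟨s, t, h⟩ := List.append_of_mem h
    exact ⟨s, t, by simp [h]⟩

theorem cwLoopA_eq (op : Bool) : ∀ (l word : List Char),
    cwLoopA op word l = word ++ l.takeWhile (fun c => !pvDelim op c) := by
  intro l
  induction l with
  | nil => intro word; simp [cwLoopA]
  | cons c cs ih =>
    intro word
    by_cases h : pvDelim op c = true
    · have hc : c = ' ' ∨ (op = true ∧ PySem.Chars.isIn [c] pvOpChars = true) := by
        simp [pvDelim] at h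
        rcases h with h | ⟨h1, h2⟩
        · exact Or.inl h
        · exact Or.inr ⟨h1, (isIn_singleton c pvOpChars).2 (by simpa using h2)⟩
      simp [cwLoopA, hc, h]
    · have hc : ¬ (c = ' ' ∨ (op = true ∧ PySem.Chars.isIn [c] pvOpChars = true)) := by
        rintro (h1 | ⟨ho, hin⟩)
        · simp [pvDelim, h1] at h
        · rw [isIn_singleton] at hin
          simp [pvDelim, ho, hin] at h
      simp only [cwLoopA, if_neg hc, List.takeWhile_cons, h]
      rw [ih]
      simp

-- prefix by a singleton
theorem singleton_prefix_iff (d : Char) (l : List Char) : [d] <+: l ↔ l.head? = some d := by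
  cases l with
  | nil => simp
  | cons x xs => simp [List.cons_prefix_cons, eq_comm]

-- generic facts about the fold computing the minimum of f over ds
theorem foldMin_le_init (f : Char → Int) : ∀ (ds : List Char) (init : Int),
    ds.foldl (fun cut d => if 0 ≤ f d ∧ f d < cut then f d else cut) init ≤ init := by
  intro ds
  induction ds with
  | nil => intro init; simp
  | cons d ds ih =>
    intro init
    simp only [List.foldl_cons]
    split_ifs with h
    · exact le_trans (ih _) (by omega)
    · exact ih init

theorem foldMin_ge (f : Char → Int) (N : Int) : ∀ (ds : List Char) (init : Int),
    N ≤ init → (∀ d ∈ ds, 0 ≤ f d → N ≤ f d) →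
    N ≤ ds.foldl (fun cut d => if 0 ≤ f d ∧ f d < cut then f d else cut) init := by
  intro ds
  induction ds with
  | nil => intro init h _; simpa using h
  | cons d ds ih =>
    intro init h hall
    simp only [List.foldl_cons]
    split_ifs with hd
    · exact ih _ (hall d (by simp) hd.1) (fun e he => hall e (by simp [he]))
    · exact ih _ h (fun e he => hall e (by simp [he]))

theorem foldMin_le_of_mem (f : Char → Int) : ∀ (ds : List Char) (init : Int) (d : Char),
    d ∈ ds → 0 ≤ f d →
    ds.foldl (fun cut e => if 0 ≤ f e ∧ f e < cut then f e else cut) init ≤ f d := by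
  intro ds
  induction ds with
  | nil => intro init d h; simp at h
  | cons e ds ih =>
    intro init d hmem hfd
    simp only [List.foldl_cons]
    rcases List.mem_cons.1 hmem with h | h
    · subst h
      split_ifs with hd
      · exact foldMin_le_init f ds (f d)
      · exact le_trans (foldMin_le_init f ds init) (by omega)
    · exact ih _ d h hfd

-- characterisation of find for a single character
theorem find_singleton_mem (d : Char) (l : List Char) (h : d ∈ l) :
    0 ≤ PySem.Chars.find l [d] := by
  rw [PySem.Chars.find_nonneg_iff]
  obtain ⟨s, t, hst⟩ := List.append_of_mem h
  exact ⟨s, t, by simp [hst]⟩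

theorem find_singleton_spec (d : Char) (l : List Char) (h : 0 ≤ PySem.Chars.find l [d]) :
    l[(PySem.Chars.find l [d]).toNat]? = some d ∧
    ∀ i < (PySem.Chars.find l [d]).toNat, l[i]? ≠ some d := by
  obtain ⟨h1, h2⟩ := PySem.Chars.find_spec (s := l) (sub := [d]) h
  rw [singleton_prefix_iff, List.head?_drop] at h1
  refine ⟨h1, fun i hi hc => h2 i hi ?_⟩
  rw [singleton_prefix_iff, List.head?_drop]
  exact hc

-- membership in the delimiter list is exactly A's loop predicate
theorem mem_delims_iff (op : Bool) (d : Char) :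
    d ∈ (if op then ' ' :: pvOpChars else [' ']) ↔ pvDelim op d = true := by
  cases op <;> simp [pvDelim, pvOpChars]

-- the core: the fold computes the index of the first delimiter (= length if none)
theorem fold_eq_findIdx (op : Bool) (l : List Char) :
    (if op then ' ' :: pvOpChars else [' ']).foldl (fun cut d =>
      if 0 ≤ PySem.Chars.find l [d] ∧ PySem.Chars.find l [d] < cut then PySem.Chars.find l [d] else cut)
      (l.length : Int)
    = (l.findIdx (pvDelim op) : Int) := by
  set ds : List Char := if op then ' ' :: pvOpChars else [' '] with hds
  set N : ℕ := l.findIdx (pvDelim op) with hN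
  have hNle : N ≤ l.length := List.findIdx_le_length
  -- every relevant find is ≥ N
  have hge : ∀ d ∈ ds, 0 ≤ PySem.Chars.find l [d] → (N : Int) ≤ PySem.Chars.find l [d] := by
    intro d hd hfd
    by_contra hlt
    push_neg at hlt
    obtain ⟨h1, _⟩ := find_singleton_spec d l hfd
    have hidx : (PySem.Chars.find l [d]).toNat < N := by omega
    obtain ⟨hlen, hval⟩ := List.getElem?_eq_some_iff.1 h1
    obtain ⟨_, hall⟩ := (List.lt_findIdx_iff l (pvDelim op) _).1 hidx
    have hfalse := hall (PySem.Chars.find l [d]).toNat le_rfl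
    have hPd : pvDelim op d = true := (mem_delims_iff op d).1 hd
    simp [hval, hPd] at hfalse
  have hlow := foldMin_ge (fun d => PySem.Chars.find l [d]) N ds (l.length : Int)
    (by exact_mod_cast hNle) hge
  by_cases hNlt : N < l.length
  · -- there is a delimiter at position N
    have hPdN : pvDelim op l[N] = true := List.findIdx_getElem (w := hNlt)
    have hdN_mem : l[N] ∈ ds := (mem_delims_iff op l[N]).2 hPdN
    have hfdN : 0 ≤ PySem.Chars.find l [l[N]] :=
      find_singleton_mem l[N] l (List.getElem_mem hNlt)
    obtain ⟨h1, h2⟩ := find_singleton_spec l[N] l hfdN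
    have hle : PySem.Chars.find l [l[N]] ≤ (N : Int) := by
      by_contra hgt
      push_neg at hgt
      exact h2 N (by omega) (by rw [List.getElem?_eq_getElem hNlt])
    have hup := foldMin_le_of_mem (fun d => PySem.Chars.find l [d]) ds (l.length : Int)
      l[N] hdN_mem hfdN
    beta_reduce at hlow hup
    omega
  · have hNeq : N = l.length := by omega
    have hinit := foldMin_le_init (fun d => PySem.Chars.find l [d]) ds (l.length : Int)
    beta_reduce at hlow hinit
    omega

theorem collect_word_spec_aux (line : String) (op : Bool) :
    collect_word line op = collect_word_alt line op := by
  unfold collect_word collect_word_alt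
  cases hl : line.toList with
  | nil => rfl
  | cons c cs =>
    by_cases hop : (op && PySem.Chars.isIn [c] pvOpChars) = true
    · simp [hop]
    · simp only [hop, Bool.false_eq_true, if_false]
      rw [cwLoopA_eq]
      have hfold := fold_eq_findIdx op (c :: cs)
      simp only [hfold]
      rw [PySem.List.slice_to_natCast, List.takeWhile_eq_take_findIdx_not]
      simp

-- ===== VERDICT (by name: the statement is the Claim_ definition above) =====
theorem collect_word_spec : Claim_equal_collect_word := by
  intro line op _
  unfold Spec_collect_word
  exact collect_word_spec_aux line op
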